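-- pv_equiv track=rewrite | github.com/majstenmark/kattis | calgary2020/20200819/H.py | offsets
-- ===== SOURCE A (Python) =====
-- def offsets(A, B):
--     N = len(A)
--     offs = []
--     for i in range(N):
--         ok = True
--         for j in range(N):
--             if A[j] == B[(i+j)%N]:
--                 ok = False
--                 break
--         if ok: offs.append(i)
--     return offs
-- ===== SOURCE B (Python) =====
-- def offsets(A, B):
--     N = len(A)
--     pos = {}
--     for j, a in enumerate(A):
--         pos.setdefault(a, []).append(j)
--     bad = [False] * N
--     for p in range(N):
--         for j in pos.get(B[p], ()):
--             bad[(p - j) % N] = True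
--     return [i for i in range(N) if not bad[i]]
-- ===== Notes on version B (the rewrite author's own statement) =====
-- stated objective: faster
-- what changed: Instead of scanning all N offsets with an inner N-step match test and break, B builds a value-to-positions dict over A once, marks the bad offsets (p-j)%N directly for each matching (position,value) pair, and reads off the unmarked offsets.
import Mathlib
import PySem

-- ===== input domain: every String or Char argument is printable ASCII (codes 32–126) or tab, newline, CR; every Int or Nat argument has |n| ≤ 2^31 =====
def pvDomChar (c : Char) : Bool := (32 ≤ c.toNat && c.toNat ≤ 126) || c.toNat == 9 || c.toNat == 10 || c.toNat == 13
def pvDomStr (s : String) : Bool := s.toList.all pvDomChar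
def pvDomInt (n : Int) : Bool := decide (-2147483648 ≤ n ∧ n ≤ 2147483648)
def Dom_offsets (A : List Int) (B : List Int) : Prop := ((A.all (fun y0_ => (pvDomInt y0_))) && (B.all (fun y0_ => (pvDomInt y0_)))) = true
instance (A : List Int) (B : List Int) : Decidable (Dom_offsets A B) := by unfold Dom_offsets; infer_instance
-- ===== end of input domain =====

-- B replaces A's per-offset inner scan (with break) by a value-to-positions index and
-- direct marking of the bad offsets (p-j)%N; objective: faster on typical data (same worst case).

-- ===== PORT A =====
-- inner 'for j in range(N): if A[j] == B[(i+j)%N]: ok = False; break' — returns the final 'ok'.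
-- Indices are in range under Pre_ (0 ≤ j < N ≤ len B), so getD's default is never read there.
def goA (A B : List Int) (i : Nat) : List Nat → Bool
  | [] => true
  | j :: rest =>
      if A.getD j 0 = B.getD ((i + j) % A.length) 0 then false else goA A B i rest

def offsets (A : List Int) (B : List Int) : List Int :=
  (List.range A.length).foldl
    (fun offs i => if goA A B i (List.range A.length) then offs ++ [(i : Int)] else offs) []

-- ===== PORT B =====
-- pos = {}; for j, a in enumerate(A): pos.setdefault(a, []).append(j)
def buildPos (A : List Int) : PySem.Dict Int (List Int) :=
  (PySem.List.enumerate A 0).foldl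
    (fun d ja => d.modify ja.2 [] (fun l => l ++ [ja.1])) PySem.Dict.empty

-- bad = [False]*N; for p in range(N): for j in pos.get(B[p], ()): bad[(p-j)%N] = True
-- (p-j)%N is in [0, N) for N > 0, so it is a valid Nat index (.toNat is exact there).
def markBad (A B : List Int) (pos : PySem.Dict Int (List Int)) : List Bool :=
  (List.range A.length).foldl
    (fun bad p =>
      (pos.getD (B.getD p 0) []).foldl
        (fun bad j => bad.set (PySem.Int.mod ((p : Int) - j) (A.length : Int)).toNat true) bad)
    (List.replicate A.length false)

def offsets_alt (A : List Int) (B : List Int) : List Int :=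
  let bad := markBad A B (buildPos A)
  (List.range A.length).foldl
    (fun acc i => if bad.getD i false then acc else acc ++ [(i : Int)]) []

-- ===== PRECONDITION & SPEC =====
-- Pre_ excludes exactly the inputs where Python A raises IndexError: whenever len(B) < len(A),
-- the access B[i] at i = len(B), j = 0 is out of range (Python B raises there too).
def Pre_offsets (A : List Int) (B : List Int) : Prop := A.length ≤ B.length
instance (A : List Int) (B : List Int) : Decidable (Pre_offsets A B) := by unfold Pre_offsets; infer_instance
def pvWitness_offsets : List Int × List Int := ([1, 2], [2, 1])

def Spec_offsets (A : List Int) (B : List Int) (out : List Int) : Prop := out = offsets_alt A B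
instance (A : List Int) (B : List Int) (out : List Int) : Decidable (Spec_offsets A B out) := by unfold Spec_offsets; infer_instance

-- ===== CLAIM (what is proved, stated in full; the proofs are below) =====
def Claim_equal_offsets : Prop := ∀ (A : List Int) (B : List Int), Dom_offsets A B → Pre_offsets A B → Spec_offsets A B (offsets A B)

-- ===== LEMMAS AND PROOFS =====

-- emod shifting helpers
lemma emod_sub_left (x y n : Int) : (x % n - y) % n = (x - y) % n := by
  rw [Int.sub_emod, Int.emod_emod_of_dvd _ dvd_rfl, ← Int.sub_emod]

lemma emod_add_left (x y n : Int) : (x % n + y) % n = (x + y) % n := by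
  rw [Int.add_emod, Int.emod_emod_of_dvd _ dvd_rfl, ← Int.add_emod]

lemma goA_eq_not_any (A B : List Int) (i : Nat) (l : List Nat) :
    goA A B i l = !l.any (fun j => decide (A.getD j 0 = B.getD ((i + j) % A.length) 0)) := by
  induction l with
  | nil => simp [goA]
  | cons j rest ih =>
      simp [goA, ih]

lemma getD_foldl_set_true (ks : List Nat) (bs : List Bool) (i : Nat)
    (h : ∀ k ∈ ks, k < bs.length) :
    (ks.foldl (fun b k => b.set k true) bs).getD i false
      = (bs.getD i false || ks.contains i) := by
  induction ks generalizing bs with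
  | nil => simp
  | cons k ks ih =>
      have hk : k < bs.length := h k (by simp)
      rw [List.foldl_cons, ih _ (by intro k' hk'; simpa using h k' (by simp [hk']))]
      simp only [List.getD, List.getElem?_set]
      by_cases hik : k = i
      · subst hik; simp [hk]
      · simp [hik, Ne.symm hik]


lemma mem_enumerate (A : List Int) (s : Int) (p : Int × Int) :
    p ∈ PySem.List.enumerate A s ↔ ∃ j : Nat, j < A.length ∧ p.1 = s + j ∧ p.2 = A.getD j 0 := by
  induction A generalizing s with
  | nil => simp [PySem.List.enumerate_nil]
  | cons a t ih =>
      rw [PySem.List.enumerate_cons, List.mem_cons, ih (s + 1)]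
      constructor
      · rintro (rfl | ⟨j, hj, h1, h2⟩)
        · exact ⟨0, by simp⟩
        · exact ⟨j + 1, by simpa using Nat.succ_lt_succ hj, by push_cast; omega, by simpa using h2⟩
      · rintro ⟨j, hj, h1, h2⟩
        cases j with
        | zero => left; simp at h1 h2; cases p; simp_all
        | succ j => right; exact ⟨j, by simpa using hj, by push_cast at h1 ⊢; omega, by simpa using h2⟩

lemma mem_buildPos (A : List Int) (v x : Int) :
    x ∈ (buildPos A).getD v [] ↔ ∃ j : Nat, j < A.length ∧ x = (j : Int) ∧ A.getD j 0 = v := by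
  have hrw : buildPos A
      = ((PySem.List.enumerate A 0).map (fun ja => (ja.2, ja.1))).foldl
          (fun d p => d.modify p.1 [] (fun l => l ++ [p.2])) PySem.Dict.empty := by
    rw [List.foldl_map]
    rfl
  rw [hrw, PySem.Dict.getD_foldl_modify_append]
  simp only [PySem.Dict.getD_empty, List.nil_append, List.mem_map, List.mem_filter,
    List.mem_map, beq_iff_eq]
  constructor
  · rintro ⟨q, ⟨⟨ja, hja, rfl⟩, hv⟩, rfl⟩
    rcases (mem_enumerate A 0 ja).1 hja with ⟨j, hj, h1, h2⟩
    exact ⟨j, hj, by simpa using h1, by simp_all⟩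
  · rintro ⟨j, hj, rfl, hv⟩
    refine ⟨((A.getD j 0), (j : Int)), ⟨⟨((j : Int), A.getD j 0), ?_, rfl⟩, by simpa using hv⟩, rfl⟩
    exact (mem_enumerate A 0 _).2 ⟨j, hj, by simp, rfl⟩

lemma markBad_getD (A B : List Int) (i : Nat) :
    (markBad A B (buildPos A)).getD i false = true
      ↔ ∃ p : Nat, p < A.length ∧ ∃ x ∈ (buildPos A).getD (B.getD p 0) [],
          (PySem.Int.mod ((p : Int) - x) (A.length : Int)).toNat = i := by
  have hstep : markBad A B (buildPos A)
      = ((List.range A.length).flatMap (fun p =>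
            ((buildPos A).getD (B.getD p 0) []).map
              (fun x => (PySem.Int.mod ((p : Int) - x) (A.length : Int)).toNat))).foldl
          (fun b k => b.set k true) (List.replicate A.length false) := by
    rw [List.foldl_flatMap]
    unfold markBad
    apply PySem.List.foldl_congr_mem
    intro b p _
    rw [List.foldl_map]
  rw [hstep, getD_foldl_set_true]
  · simp [List.mem_flatMap]
  · intro k hk
    simp only [List.mem_flatMap, List.mem_map, List.mem_range] at hk
    obtain ⟨p, hp, x, _, rfl⟩ := hk
    have hN : (0 : Int) < (A.length : Int) := by
      have : 0 < A.length := by omega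
      exact_mod_cast this
    have h1 := PySem.Int.mod_nonneg ((p : Int) - x) hN
    have h2 := PySem.Int.mod_lt ((p : Int) - x) hN
    simp only [List.length_replicate]
    omega

lemma key_iff (A B : List Int) (i : Nat) (hi : i < A.length) :
    (∃ j : Nat, j < A.length ∧ A.getD j 0 = B.getD ((i + j) % A.length) 0)
      ↔ ∃ p : Nat, p < A.length ∧ ∃ x ∈ (buildPos A).getD (B.getD p 0) [],
          (PySem.Int.mod ((p : Int) - x) (A.length : Int)).toNat = i := by
  have hN : 0 < A.length := Nat.pos_of_ne_zero (by omega)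
  have hNZ : (0 : Int) < (A.length : Int) := by exact_mod_cast hN
  constructor
  · rintro ⟨j, hj, h⟩
    refine ⟨(i + j) % A.length, Nat.mod_lt _ hN, (j : Int), ?_, ?_⟩
    · exact (mem_buildPos A _ _).2 ⟨j, hj, rfl, h.symm ▸ rfl⟩
    · rw [PySem.Int.mod_eq_emod_of_pos hNZ]
      have hc : ((((i + j) % A.length : Nat)) : Int) = ((i : Int) + j) % (A.length : Int) := by
        push_cast [Int.natCast_emod]; ring_nf
      rw [hc, emod_sub_left]
      have : (i : Int) + j - j = i := by ring
      rw [this, Int.emod_eq_of_lt (by positivity) (by exact_mod_cast hi)]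
      simp
  · rintro ⟨p, hp, x, hx, hidx⟩
    obtain ⟨j, hj, rfl, hv⟩ := (mem_buildPos A _ _).1 hx
    refine ⟨j, hj, ?_⟩
    rw [PySem.Int.mod_eq_emod_of_pos hNZ] at hidx
    have h1 := Int.emod_nonneg ((p : Int) - j) hNZ.ne'
    have h2 := Int.emod_lt_of_pos ((p : Int) - j) hNZ
    have hiInt : (i : Int) = ((p : Int) - j) % (A.length : Int) := by omega
    have hpn : (i + j) % A.length = p := by
      have : (((i + j) % A.length : Nat) : Int) = (p : Nat) := by
        push_cast [Int.natCast_emod]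
        rw [hiInt, emod_add_left]
        have : (p : Int) - j + j = p := by ring
        rw [this, Int.emod_eq_of_lt (by positivity) (by exact_mod_cast hp)]
      exact_mod_cast this
    rw [hpn, hv]

theorem offsets_eq (A B : List Int) : offsets A B = offsets_alt A B := by
  simp only [offsets, offsets_alt]
  have hflip : (fun (acc : List Int) (i : Nat) =>
        if (markBad A B (buildPos A)).getD i false then acc else acc ++ [(i : Int)])
      = (fun acc i =>
        if !(markBad A B (buildPos A)).getD i false then acc ++ [(i : Int)] else acc) := by
    funext acc i
    cases (markBad A B (buildPos A)).getD i false <;> simp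
  rw [hflip,
    PySem.List.foldl_append_if (fun i => goA A B i (List.range A.length)) (fun i => (i : Int)),
    PySem.List.foldl_append_if (fun i => !(markBad A B (buildPos A)).getD i false) (fun i => (i : Int))]
  simp only [List.nil_append]
  apply congrArg
  apply List.filter_congr
  intro i hi
  have hi' : i < A.length := List.mem_range.mp hi
  rw [goA_eq_not_any]
  apply congrArg
  rw [Bool.eq_iff_iff]
  rw [List.any_eq_true]
  rw [markBad_getD]
  rw [← key_iff A B i hi']
  constructor
  · rintro ⟨j, hj, h⟩
    exact ⟨j, List.mem_range.mp hj, of_decide_eq_true h⟩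
  · rintro ⟨j, hj, h⟩
    exact ⟨j, List.mem_range.mpr hj, decide_eq_true h⟩

-- ===== VERDICT (by name: the statement is the Claim_ definition above) =====
theorem offsets_spec : Claim_equal_offsets := by
  intro A B _ _
  exact offsets_eq A B
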